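-- pv_equiv track=rewrite | github.com/FajFs/aoc | 2020/day6.py | part1
-- ===== SOURCE A (Python) =====
-- def part1(inp: list) -> int:
--     entries, e = [], ""
--     for line in inp:
--         if not line:
--             entries.append(e)
--             e = ""
--         else:
--             e += line
--     entries.append(e)
--
--     res = 0
--     for line in entries:
--         res += len(set(line))
--     return res
-- ===== SOURCE B (Python) =====
-- def part1(inp: list) -> int:
--     res, cur = 0, set()
--     for line in inp:
--         if not line:
--             res += len(cur)
--             cur = set()
--         else:
--             cur.update(line)
--     return res + len(cur)
-- ===== Notes on version B (the rewrite author's own statement) =====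
-- stated objective: simpler
-- what changed: Single fused pass keeping a running character set and total instead of first building a list of concatenated group strings and then summing set sizes in a second loop.
import Mathlib
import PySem

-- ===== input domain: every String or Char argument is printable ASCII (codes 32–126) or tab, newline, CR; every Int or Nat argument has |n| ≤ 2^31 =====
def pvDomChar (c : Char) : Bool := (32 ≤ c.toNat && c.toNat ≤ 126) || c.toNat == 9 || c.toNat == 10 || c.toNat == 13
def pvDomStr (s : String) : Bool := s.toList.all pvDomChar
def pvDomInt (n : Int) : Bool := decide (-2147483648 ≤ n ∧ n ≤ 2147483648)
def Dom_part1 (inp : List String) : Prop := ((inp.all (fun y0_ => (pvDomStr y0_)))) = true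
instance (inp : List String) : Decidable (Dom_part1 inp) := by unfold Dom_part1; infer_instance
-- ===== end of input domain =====

-- B fuses A's two phases into one pass with a live set and a running total (objective: simpler).

-- ===== PORT A =====
-- one step of A's grouping loop: state = (entries, current concatenation e); strings as List Char
def part1Astep (p : List (List Char) × List Char) (line : String) : List (List Char) × List Char :=
  if line.toList.isEmpty then (p.1 ++ [p.2], ([] : List Char)) else (p.1, p.2 ++ line.toList)

def part1 (inp : List String) : Int :=
  let st := inp.foldl part1Astep ([], [])
  let entries := st.1 ++ [st.2]
  entries.foldl (fun res e => res + PySem.Set.len (PySem.Set.ofList e)) 0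

-- ===== PORT B =====
-- one step of B's fused loop: state = (running total, live set of characters)
def part1Bstep (p : Int × PySem.Set Char) (line : String) : Int × PySem.Set Char :=
  if line.toList.isEmpty then (p.1 + PySem.Set.len p.2, PySem.Set.empty)
  else (p.1, PySem.Set.update p.2 line.toList)

def part1_alt (inp : List String) : Int :=
  let st := inp.foldl part1Bstep (0, PySem.Set.empty)
  st.1 + PySem.Set.len st.2

-- ===== PRECONDITION & SPEC =====
def Spec_part1 (inp : List String) (out : Int) : Prop := out = part1_alt inp
instance (inp : List String) (out : Int) : Decidable (Spec_part1 inp out) := by unfold Spec_part1; infer_instance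

-- ===== CLAIM (what is proved, stated in full; the proofs are below) =====
def Claim_equal_part1 : Prop := ∀ (inp : List String), Dom_part1 inp → Spec_part1 inp (part1 inp)

-- ===== LEMMAS AND PROOFS =====

-- A's grouping loop with accumulated entries prefix
theorem part1_A_pre (inp : List String) (pre : List (List Char)) (e : List Char) :
    inp.foldl part1Astep (pre, e)
      = (pre ++ (inp.foldl part1Astep ([], e)).1, (inp.foldl part1Astep ([], e)).2) := by
  induction inp generalizing pre e with
  | nil => simp
  | cons line rest ih =>
    simp only [List.foldl_cons, part1Astep]
    by_cases h : line.toList.isEmpty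
    · simp only [h, if_pos, List.nil_append]
      rw [ih (pre ++ [e]) [], ih [e] []]
      simp
    · simp only [h, Bool.false_eq_true, if_neg, not_false_iff]
      rw [ih]

-- A's summing loop from an arbitrary accumulator
theorem part1_sum_acc (l : List (List Char)) (r : Int) :
    l.foldl (fun res e => res + PySem.Set.len (PySem.Set.ofList e)) r
      = r + l.foldl (fun res e => res + PySem.Set.len (PySem.Set.ofList e)) 0 := by
  induction l generalizing r with
  | nil => simp
  | cons x xs ih =>
    simp only [List.foldl_cons]
    rw [ih (r + _), ih (0 + _)]
    ring

-- main invariant: B's fused loop from (res, set(e)) equals res + A's sum over the groups of inp started with e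
theorem part1_key (inp : List String) (e : List Char) (res : Int) :
    (inp.foldl part1Bstep (res, PySem.Set.ofList e)).1
        + PySem.Set.len (inp.foldl part1Bstep (res, PySem.Set.ofList e)).2
      = res + ((inp.foldl part1Astep ([], e)).1 ++ [(inp.foldl part1Astep ([], e)).2]).foldl
          (fun r g => r + PySem.Set.len (PySem.Set.ofList g)) 0 := by
  induction inp generalizing e res with
  | nil => simp
  | cons line rest ih =>
    simp only [List.foldl_cons, part1Bstep, part1Astep]
    by_cases h : line.toList.isEmpty
    · simp only [h, if_pos, List.nil_append]
      have hB := ih [] (res + PySem.Set.len (PySem.Set.ofList e))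
      rw [show (PySem.Set.empty : PySem.Set Char) = PySem.Set.ofList [] from rfl, hB]
      rw [part1_A_pre rest [e] []]
      rw [List.append_assoc]
      simp only [List.foldl_append, List.foldl_cons, List.foldl_nil, zero_add]
      rw [part1_sum_acc _ (PySem.Set.len (PySem.Set.ofList e))]
      ring
    · simp only [h, if_neg, Bool.false_eq_true, not_false_iff]
      rw [← PySem.Set.ofList_append, ih]
  -- (ih applies since update (ofList e) line.toList = ofList (e ++ line.toList))

-- ===== VERDICT (by name: the statement is the Claim_ definition above) =====
theorem part1_spec : Claim_equal_part1 := by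
  intro inp _
  unfold Spec_part1 part1 part1_alt
  have := part1_key inp [] 0
  simp only [PySem.Set.ofList_nil] at this
  simpa using this.symm
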